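-- pv_equiv track=rewrite | github.com/felixseriksson/competitive | ncpc2020/joiningflows.py | calculatemaxtoadd
-- ===== SOURCE A (Python) =====
-- def calculatemaxtoadd(flowleft, flowlist):
--     ret = 0
--     for flow in flowlist:
--         if flowleft >= flow[2] - flow[1]:
--             ret += (flow[2] - flow[1]) * flow[0]
--             flowleft -= (flow[2] - flow[1])
--         else:
--             ret += flow[0]*flowleft
--             break
--     return ret
-- ===== SOURCE B (Python) =====
-- def calculatemaxtoadd(flowleft, flowlist):
--     # Build a "plan" function back-to-front: a right fold over the flows that
--     # composes closures.  plan(budget) answers "revenue obtainable from the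
--     # remaining flows with this budget"; each flow wraps the plan of its suffix.
--     def make(flow, rest_plan):
--         rate, lo, hi = flow
--         d = hi - lo
--         def plan(budget):
--             if budget >= d:
--                 return rate * d + rest_plan(budget - d)
--             return rate * budget
--         return plan
--     plan = lambda budget: 0
--     for flow in reversed(flowlist):
--         plan = make(flow, plan)
--     return plan(flowleft)
-- ===== Notes on version B (the rewrite author's own statement) =====
-- stated objective: alternative
-- what changed: A threads mutable state (accumulated revenue and shrinking budget) through one forward loop with a break; B instead builds, by a right fold over the list (back-to-front), a composed continuation function from budget to revenue, and applies it once to the initial budget.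
import Mathlib
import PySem

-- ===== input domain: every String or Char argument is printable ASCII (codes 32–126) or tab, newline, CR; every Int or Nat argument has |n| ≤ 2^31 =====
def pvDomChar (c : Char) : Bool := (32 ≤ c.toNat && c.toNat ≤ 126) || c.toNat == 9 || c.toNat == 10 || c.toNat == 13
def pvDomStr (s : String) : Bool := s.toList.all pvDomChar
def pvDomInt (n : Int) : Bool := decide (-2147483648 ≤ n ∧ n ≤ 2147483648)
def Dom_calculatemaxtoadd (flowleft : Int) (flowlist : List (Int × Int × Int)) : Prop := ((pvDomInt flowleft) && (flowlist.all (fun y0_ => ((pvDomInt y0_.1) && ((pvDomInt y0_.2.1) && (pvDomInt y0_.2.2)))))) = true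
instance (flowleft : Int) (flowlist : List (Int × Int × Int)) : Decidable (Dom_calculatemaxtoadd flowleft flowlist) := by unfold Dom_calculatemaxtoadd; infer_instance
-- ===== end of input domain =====

-- B replaces A's forward loop with mutable state by a right fold that composes
-- a budget→revenue continuation back-to-front, applied once (objective: alternative).

-- ===== PORT A =====
-- A's loop with mutable `ret`/`flowleft` and `break`, as structural recursion.
def calcA_go (ret : Int) (flowleft : Int) : List (Int × Int × Int) → Int
  | [] => ret
  | (r, lo, hi) :: rest =>
      if flowleft ≥ hi - lo then
        calcA_go (ret + (hi - lo) * r) (flowleft - (hi - lo)) rest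
      else
        ret + r * flowleft

def calculatemaxtoadd (flowleft : Int) (flowlist : List (Int × Int × Int)) : Int :=
  calcA_go 0 flowleft flowlist

-- ===== PORT B =====
-- Source B's `make`: wrap the plan of the suffix with one flow's closure.
def calcB_make (flow : Int × Int × Int) (restPlan : Int → Int) : Int → Int :=
  fun budget =>
    if budget ≥ flow.2.2 - flow.2.1 then
      flow.1 * (flow.2.2 - flow.2.1) + restPlan (budget - (flow.2.2 - flow.2.1))
    else
      flow.1 * budget

-- Source B's loop over reversed(flowlist) composing closures is exactly a right fold.
def calculatemaxtoadd_alt (flowleft : Int) (flowlist : List (Int × Int × Int)) : Int :=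
  (flowlist.foldr calcB_make (fun _ => 0)) flowleft

-- ===== PRECONDITION & SPEC =====
def Spec_calculatemaxtoadd (flowleft : Int) (flowlist : List (Int × Int × Int)) (out : Int) : Prop := out = calculatemaxtoadd_alt flowleft flowlist
instance (flowleft : Int) (flowlist : List (Int × Int × Int)) (out : Int) : Decidable (Spec_calculatemaxtoadd flowleft flowlist out) := by unfold Spec_calculatemaxtoadd; infer_instance

-- ===== CLAIM (what is proved, stated in full; the proofs are below) =====
def Claim_equal_calculatemaxtoadd : Prop := ∀ (flowleft : Int) (flowlist : List (Int × Int × Int)), Dom_calculatemaxtoadd flowleft flowlist → Spec_calculatemaxtoadd flowleft flowlist (calculatemaxtoadd flowleft flowlist)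

-- ===== LEMMAS AND PROOFS =====

theorem calcA_go_eq_plan (l : List (Int × Int × Int)) :
    ∀ (ret flowleft : Int),
      calcA_go ret flowleft l = ret + (l.foldr calcB_make (fun _ => 0)) flowleft := by
  induction l with
  | nil => intro ret flowleft; simp [calcA_go]
  | cons f rest ih =>
      intro ret flowleft
      obtain ⟨r, lo, hi⟩ := f
      simp only [calcA_go, List.foldr_cons, calcB_make]
      by_cases h : flowleft ≥ hi - lo
      · rw [if_pos h, if_pos h, ih]; ring
      · rw [if_neg h, if_neg h]

-- ===== VERDICT (by name: the statement is the Claim_ definition above) =====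
theorem calculatemaxtoadd_spec : Claim_equal_calculatemaxtoadd := by
  intro flowleft flowlist _
  unfold Spec_calculatemaxtoadd calculatemaxtoadd calculatemaxtoadd_alt
  rw [calcA_go_eq_plan]
  ring
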